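-- pv_equiv track=rewrite | github.com/ekingungor/assignments | NLP - Spelling Correction/correct.py | bottomUpTable
-- ===== SOURCE A (Python) =====
-- def bottomUpTable(entry, database):
--     n = len(entry)
--     # includesword = [[False for x in range(n + 1)] for y in range(n + 1)]
--     separate = [[0 for x in range(n + 1)] for y in range(n + 1)]
--     point = [[0 for x in range(n + 1)] for y in range(n + 1)]
--     # all length of 1 substrings' cost points are got from the database
--     for x in range(n):
--         point[x][x + 1] = database.get(str(entry[x:x + 1]), 0)
--     # all length of more than 1 substrings' points are evaluated from the smaller sub strings and directly from
--     # the database.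
--     for L in range(2, n + 1):
--         for i in range(n - L + 1):
--             j = i + L
--             point[i][j] = 0
--             for k in range(i + 1, j):
--                 q = point[i][k] * point[k][j]
--                 if q > point[i][j]:
--                     point[i][j] = q
--                     separate[i][j] = k
--
--             q = database.get(str(entry[i:j]), 0)
--             if q * q * 100 > point[i][j]:
--                 point[i][j] = q
--                 separate[i][j] = 0
--     return separate
-- ===== SOURCE B (Python) =====
-- def bottomUpTable(entry, database):
--     n = len(entry)
--     memo = {}
--
--     def point(i, j):
--         # top-down memoized best-split value of entry[i:j]
--         if (i, j) in memo:
--             return memo[(i, j)]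
--         if j == i + 1:
--             v = database.get(entry[i:j], 0)
--         else:
--             m = 0
--             for k in range(i + 1, j):
--                 p = point(i, k) * point(k, j)
--                 if p > m:
--                     m = p
--             q = database.get(entry[i:j], 0)
--             v = q if q * q * 100 > m else m
--         memo[(i, j)] = v
--         return v
--
--     for i in range(n):
--         for j in range(i + 1, n + 1):
--             point(i, j)
--
--     def sep(i, j):
--         ps = [memo[(i, k)] * memo[(k, j)] for k in range(i + 1, j)]
--         m = max(ps)
--         q = database.get(entry[i:j], 0)
--         if q * q * 100 > max(m, 0):
--             return 0
--         return i + 1 + ps.index(m) if m > 0 else 0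
--
--     return [[sep(i, j) if i + 2 <= j else 0 for j in range(n + 1)]
--             for i in range(n + 1)]
-- ===== Notes on version B (the rewrite author's own statement) =====
-- stated objective: alternative
-- what changed: Replaces the in-place bottom-up length-ordered table fill (running max and separate updated cell-by-cell inside the scan) with a top-down memoized recursion computing the point values, after which the separate table is built as a pure nested comprehension using max and first-index-of-max per cell.
import Mathlib
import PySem

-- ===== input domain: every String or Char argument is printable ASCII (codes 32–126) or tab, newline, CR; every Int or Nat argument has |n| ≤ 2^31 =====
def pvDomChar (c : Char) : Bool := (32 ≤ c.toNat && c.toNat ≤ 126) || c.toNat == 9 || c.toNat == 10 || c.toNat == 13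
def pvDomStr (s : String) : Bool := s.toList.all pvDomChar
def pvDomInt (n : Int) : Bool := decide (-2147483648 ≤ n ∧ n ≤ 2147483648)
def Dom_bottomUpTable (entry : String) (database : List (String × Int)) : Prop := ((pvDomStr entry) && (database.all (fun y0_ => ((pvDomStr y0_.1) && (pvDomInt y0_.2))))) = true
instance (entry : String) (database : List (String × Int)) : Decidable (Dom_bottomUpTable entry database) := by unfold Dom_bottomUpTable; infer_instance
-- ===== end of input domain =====

-- B rewrites A's bottom-up length-ordered table fill as a top-down memoized recursion for the
-- point values plus a pure per-cell max/first-index computation of the separate table (objective: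
-- alternative decomposition; same asymptotic cost).

-- ===== PORT A =====
-- shared low-level helper (both Pythons contain this exact expression)
-- database.get(str(entry[i:j]), 0)  (str() on a str is the identity)
def pvDb (entry : String) (database : List (String × Int)) (i j : Nat) : Int :=
  PySem.Dict.getD ⟨database⟩ (PySem.Str.slice entry (some (i : Int)) (some (j : Int))) 0

-- m[i][j]  (read; A only reads in-range cells)
def pvGet2 (m : List (List Int)) (i j : Nat) : Int := (m.getD i []).getD j 0
-- m[i][j] = v  (write; A only writes in-range cells)
def pvSet2 (m : List (List Int)) (i j : Nat) (v : Int) : List (List Int) :=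
  m.set i ((m.getD i []).set j v)

-- the body of A's 'for i in range(n - L + 1)' loop (state = (point, separate))
def pvCellA (entry : String) (database : List (String × Int)) (L : Nat)
    (st : List (List Int) × List (List Int)) (i : Nat) : List (List Int) × List (List Int) :=
  let j := i + L
  let st := (pvSet2 st.1 i j 0, st.2)
  let st := (List.range' (i + 1) (L - 1)).foldl
    (fun (st : List (List Int) × List (List Int)) k =>
      let q := pvGet2 st.1 i k * pvGet2 st.1 k j
      if q > pvGet2 st.1 i j then (pvSet2 st.1 i j q, pvSet2 st.2 i j (k : Int)) else st)
    st
  let q := pvDb entry database i j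
  if q * q * 100 > pvGet2 st.1 i j then (pvSet2 st.1 i j q, pvSet2 st.2 i j 0) else st

def bottomUpTable (entry : String) (database : List (String × Int)) : List (List Int) :=
  let n := entry.toList.length
  let separate := List.replicate (n + 1) (List.replicate (n + 1) (0 : Int))
  let point := List.replicate (n + 1) (List.replicate (n + 1) (0 : Int))
  -- for x in range(n): point[x][x+1] = database.get(str(entry[x:x+1]), 0)
  let point := (List.range n).foldl
    (fun pt x => pvSet2 pt x (x + 1) (pvDb entry database x (x + 1))) point
  -- for L in range(2, n+1): for i in range(n-L+1): …
  let st := (List.range' 2 (n - 1)).foldl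
    (fun (st : List (List Int) × List (List Int)) L =>
      (List.range (n - L + 1)).foldl (pvCellA entry database L) st)
    (point, separate)
  st.2

-- ===== PORT B =====
-- def point(i, j): top-down memoized recursion; the memo dict is threaded explicitly.
-- The fuel argument only drives termination (j - i suffices); Python needs none.
def pvSolve (entry : String) (database : List (String × Int)) :
    Nat → Nat → Nat → PySem.Dict (Nat × Nat) Int → Int × PySem.Dict (Nat × Nat) Int
  | 0, _, _, memo => (0, memo)   -- unreachable for fuel ≥ j - i > 0
  | f + 1, i, j, memo =>
    match memo.get? (i, j) with
    | some v => (v, memo)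
    | none =>
      let vm :=
        if j = i + 1 then (pvDb entry database i j, memo)
        else
          let mm := (List.range' (i + 1) (j - i - 1)).foldl
            (fun (st : Int × PySem.Dict (Nat × Nat) Int) k =>
              let amo := pvSolve entry database f i k st.2
              let bmo := pvSolve entry database f k j amo.2
              let p := amo.1 * bmo.1
              (if p > st.1 then p else st.1, bmo.2))
            ((0 : Int), memo)
          let q := pvDb entry database i j
          (if q * q * 100 > mm.1 then q else mm.1, mm.2)
      (vm.1, vm.2.insert (i, j) vm.1)

-- def sep(i, j): pure reads of the (fully populated) memo; memo[(i,k)] is ported as getD _ 0,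
-- exact here because phase 1 below inserts every key (i, k), i < k ≤ n, that sep reads.
def pvSepB (entry : String) (database : List (String × Int))
    (memo : PySem.Dict (Nat × Nat) Int) (i j : Nat) : Int :=
  let ps := (List.range' (i + 1) (j - i - 1)).map
    (fun k => memo.getD (i, k) 0 * memo.getD (k, j) 0)
  let m := (PySem.List.max? ps (fun y => y)).getD 0   -- ps nonempty whenever sep is called
  let q := pvDb entry database i j
  if q * q * 100 > max m 0 then 0
  else if m > 0 then (i : Int) + 1 + ((PySem.List.index? ps m).getD 0 : Nat) else 0

def bottomUpTable_alt (entry : String) (database : List (String × Int)) : List (List Int) :=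
  let n := entry.toList.length
  -- for i in range(n): for j in range(i+1, n+1): point(i, j)
  let memo := (List.range n).foldl (fun memo i =>
      (List.range' (i + 1) (n - i)).foldl
        (fun memo j => (pvSolve entry database (j - i) i j memo).2) memo)
    PySem.Dict.empty
  -- [[sep(i, j) if i + 2 <= j else 0 for j in range(n+1)] for i in range(n+1)]
  (List.range (n + 1)).map (fun i => (List.range (n + 1)).map (fun j =>
    if i + 2 ≤ j then pvSepB entry database memo i j else 0))

-- ===== PRECONDITION & SPEC =====
def Spec_bottomUpTable (entry : String) (database : List (String × Int)) (out : List (List Int)) : Prop := out = bottomUpTable_alt entry database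
instance (entry : String) (database : List (String × Int)) (out : List (List Int)) : Decidable (Spec_bottomUpTable entry database out) := by unfold Spec_bottomUpTable; infer_instance

-- ===== CLAIM (what is proved, stated in full; the proofs are below) =====
def Claim_equal_bottomUpTable : Prop := ∀ (entry : String) (database : List (String × Int)), Dom_bottomUpTable entry database → Spec_bottomUpTable entry database (bottomUpTable entry database)

-- ===== LEMMAS AND PROOFS =====

-- the pure value of point[i][j] (fuel-indexed; pvP uses fuel j - i)
def pvPf (entry : String) (database : List (String × Int)) : Nat → Nat → Nat → Int
  | 0, _, _ => 0
  | f + 1, i, j =>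
    if j ≤ i then 0
    else if j = i + 1 then pvDb entry database i j
    else
      let m := (List.range' (i + 1) (j - i - 1)).foldl
        (fun m k =>
          let p := pvPf entry database f i k * pvPf entry database f k j
          if p > m then p else m) 0
      let q := pvDb entry database i j
      if q * q * 100 > m then q else m

def pvP (entry : String) (database : List (String × Int)) (i j : Nat) : Int :=
  pvPf entry database (j - i) i j

-- the pure (value, argmax-index) pair left behind by A's inner k-loop
def pvFoldMS (entry : String) (database : List (String × Int)) (i j : Nat) : Int × Int :=
  (List.range' (i + 1) (j - i - 1)).foldl
    (fun (st : Int × Int) k =>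
      let p := pvP entry database i k * pvP entry database k j
      if p > st.1 then (p, (k : Int)) else st)
    ((0 : Int), (0 : Int))

-- the pure value of separate[i][j] (for 2 ≤ j - i)
def pvS (entry : String) (database : List (String × Int)) (i j : Nat) : Int :=
  let ms := pvFoldMS entry database i j
  if pvDb entry database i j * pvDb entry database i j * 100 > ms.1 then 0 else ms.2

-- the matrix whose (i, j) cell is f i j, 0 ≤ i, j ≤ n
def pvMk (n : Nat) (f : Nat → Nat → Int) : List (List Int) :=
  (List.range (n + 1)).map (fun i => (List.range (n + 1)).map (f i))

-- point table contents after all rounds L' ≤ L, and separate table contents likewise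
def pvPtF (entry : String) (database : List (String × Int)) (n L i j : Nat) : Int :=
  if 1 ≤ j - i ∧ j - i ≤ L ∧ j ≤ n then pvP entry database i j else 0
def pvSepF (entry : String) (database : List (String × Int)) (n L i j : Nat) : Int :=
  if 2 ≤ j - i ∧ j - i ≤ L ∧ j ≤ n then pvS entry database i j else 0

theorem getD_mk {n i : Nat} (f : Nat → Nat → Int) (hi : i ≤ n) :
    (pvMk n f).getD i [] = (List.range (n + 1)).map (f i) := by
  unfold pvMk
  rw [List.getD_eq_getElem?_getD]
  simp [List.getElem?_map, List.getElem?_range, Nat.lt_succ_of_le hi]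

theorem set_map_range {α : Type} (m b : Nat) (g : Nat → α) (v : α) (_hb : b < m) :
    ((List.range m).map g).set b v
      = (List.range m).map (fun j => if j = b then v else g j) := by
  apply List.ext_getElem
  · simp
  · intro k h1 h2
    simp only [List.getElem_set, List.getElem_map, List.getElem_range]
    simp only [List.length_set, List.length_map, List.length_range] at h1
    by_cases hk : b = k <;> simp [hk]
    · omega

theorem pvMk_congr {n : Nat} {f g : Nat → Nat → Int}
    (h : ∀ i j, i ≤ n → j ≤ n → f i j = g i j) : pvMk n f = pvMk n g := by
  unfold pvMk
  refine List.map_congr_left (fun i hi => ?_)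
  refine List.map_congr_left (fun j hj => ?_)
  simp only [List.mem_range] at hi hj
  exact h i j (by omega) (by omega)

theorem pvMk_replicate (n : Nat) :
    List.replicate (n + 1) (List.replicate (n + 1) (0 : Int)) = pvMk n (fun _ _ => 0) := by
  simp [pvMk, List.map_const']

theorem pvGet2_mk {n i j : Nat} (f : Nat → Nat → Int) (hi : i ≤ n) (hj : j ≤ n) :
    pvGet2 (pvMk n f) i j = f i j := by
  unfold pvGet2
  rw [getD_mk f hi, List.getD_eq_getElem?_getD]
  simp [List.getElem?_map, List.getElem?_range, Nat.lt_succ_of_le hj]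

theorem pvSet2_mk {n a b : Nat} (f : Nat → Nat → Int) (v : Int) (ha : a ≤ n) (hb : b ≤ n) :
    pvSet2 (pvMk n f) a b v = pvMk n (fun i j => if i = a ∧ j = b then v else f i j) := by
  unfold pvSet2
  rw [getD_mk f ha, set_map_range _ b _ v (by omega)]
  show (pvMk n f).set a _ = _
  unfold pvMk
  rw [set_map_range _ a _ _ (by omega)]
  refine List.map_congr_left (fun i hi => ?_)
  by_cases hia : i = a
  · subst hia
    simp only [if_pos rfl]
    refine List.map_congr_left (fun j hj => ?_)
    by_cases hjb : j = b <;> simp [hjb]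
  · simp only [if_neg hia]
    refine List.map_congr_left (fun j hj => ?_)
    simp [hia]

theorem pvPf_stable (entry : String) (database : List (String × Int)) :
    ∀ (f : Nat) (i j : Nat), j - i ≤ f →
      pvPf entry database f i j = pvP entry database i j := by
  intro f
  induction f using Nat.strong_induction_on with
  | _ f IH =>
    intro i j hf
    match f with
    | 0 =>
      have : j - i = 0 := by omega
      unfold pvP; rw [this]
    | f + 1 =>
      by_cases hji : j ≤ i
      · have h0 : j - i = 0 := by omega
        unfold pvP; rw [h0]
        simp [pvPf, hji]
      · by_cases h1 : j = i + 1
        · have : j - i = 1 := by omega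
          unfold pvP; rw [this]
          simp [pvPf, hji, h1]
        · have h2 : 2 ≤ j - i := by omega
          have hji' : j - i = (j - i - 1) + 1 := by omega
          unfold pvP
          rw [hji']
          show pvPf entry database (f+1) i j = pvPf entry database ((j-i-1)+1) i j
          simp only [pvPf, if_neg hji, if_neg h1]
          have hF : (List.range' (i + 1) (j - i - 1)).foldl
              (fun m k =>
                let p := pvPf entry database f i k * pvPf entry database f k j
                if p > m then p else m) 0
            = (List.range' (i + 1) (j - i - 1)).foldl
              (fun m k =>
                let p := pvPf entry database (j - i - 1) i k * pvPf entry database (j - i - 1) k j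
                if p > m then p else m) 0 := by
            apply PySem.List.foldl_congr_mem
            intro m k hk
            simp only [List.mem_range'_1] at hk
            rw [IH f (by omega) i k (by omega), IH f (by omega) k j (by omega),
                IH (j-i-1) (by omega) i k (by omega), IH (j-i-1) (by omega) k j (by omega)]
          simp only [hF]

theorem pvP_base (entry : String) (database : List (String × Int)) (i : Nat) :
    pvP entry database i (i + 1) = pvDb entry database i (i + 1) := by
  unfold pvP
  have : i + 1 - i = 1 := by omega
  rw [this]
  simp [pvPf]

theorem pvFold_fst (A : Nat → Int) (B : Nat → Int) :
    ∀ (ks : List Nat) (m s : Int),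
      ((ks.foldl (fun (st : Int × Int) k =>
          let p := A k
          if p > st.1 then (p, B k) else st) (m, s)).1)
      = ks.foldl (fun m k => let p := A k; if p > m then p else m) m := by
  intro ks
  induction ks with
  | nil => intro m s; rfl
  | cons k t ih =>
    intro m s
    simp only [List.foldl_cons]
    by_cases h : A k > m <;> simp [h, ih]

theorem pvP_two (entry : String) (database : List (String × Int)) {i j : Nat}
    (h : 2 ≤ j - i) :
    pvP entry database i j =
      (if pvDb entry database i j * pvDb entry database i j * 100 > (pvFoldMS entry database i j).1
       then pvDb entry database i j else (pvFoldMS entry database i j).1) := by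
  have hji : j - i = (j - i - 1) + 1 := by omega
  conv_lhs => rw [pvP, hji]
  simp only [pvPf, if_neg (show ¬ j ≤ i by omega), if_neg (show ¬ j = i + 1 by omega)]
  have hfold : (pvFoldMS entry database i j).1
      = (List.range' (i + 1) (j - i - 1)).foldl
          (fun m k => let p := pvP entry database i k * pvP entry database k j
                      if p > m then p else m) 0 := by
    unfold pvFoldMS
    exact pvFold_fst _ _ _ _ _
  rw [hfold]
  have hF : (List.range' (i + 1) (j - i - 1)).foldl
      (fun m k =>
        let p := pvPf entry database (j - i - 1) i k * pvPf entry database (j - i - 1) k j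
        if p > m then p else m) 0
    = (List.range' (i + 1) (j - i - 1)).foldl
      (fun m k =>
        let p := pvP entry database i k * pvP entry database k j
        if p > m then p else m) 0 := by
    apply PySem.List.foldl_congr_mem
    intro m k hk
    simp only [List.mem_range'_1] at hk
    rw [pvPf_stable entry database _ i k (by omega), pvPf_stable entry database _ k j (by omega)]
  simp only [hF]

-- A's init loop fills the length-1 diagonal
theorem pvInitA (entry : String) (database : List (String × Int)) (n : Nat) :
    ∀ m, m ≤ n →
      (List.range m).foldl
        (fun pt x => pvSet2 pt x (x + 1) (pvDb entry database x (x + 1)))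
        (pvMk n (fun _ _ => 0))
      = pvMk n (fun i j => if j - i = 1 ∧ j ≤ m then pvP entry database i j else 0) := by
  intro m
  induction m with
  | zero =>
    intro _
    simp only [List.range_zero, List.foldl_nil]
    apply pvMk_congr
    intro i j _ _
    have hno : ¬(j - i = 1 ∧ j ≤ 0) := by omega
    rw [if_neg hno]
  | succ m ih =>
    intro hm
    rw [List.range_succ, List.foldl_append, ih (by omega), List.foldl_cons, List.foldl_nil]
    rw [pvSet2_mk _ _ (by omega) (by omega)]
    apply pvMk_congr
    intro i j hi hj
    by_cases hcase : i = m ∧ j = m + 1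
    · obtain ⟨rfl, rfl⟩ := hcase
      rw [if_pos ⟨rfl, rfl⟩, if_pos (by omega), pvP_base]
    · rw [if_neg hcase]
      by_cases h1 : j - i = 1 ∧ j ≤ m
      · rw [if_pos h1, if_pos (by omega)]
      · rw [if_neg h1, if_neg (by omega)]

theorem pvCellA_eq (entry : String) (database : List (String × Int)) {n L i : Nat}
    (hL : 2 ≤ L) (hin : i + L ≤ n) (f g : Nat → Nat → Int)
    (Hf : ∀ a b, 1 ≤ b - a → b - a < L → b ≤ n → f a b = pvP entry database a b)
    (Hg0 : g i (i + L) = 0) :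
    pvCellA entry database L (pvMk n f, pvMk n g) i
      = (pvMk n (fun a b => if a = i ∧ b = i + L then pvP entry database a b else f a b),
         pvMk n (fun a b => if a = i ∧ b = i + L then pvS entry database a b else g a b)) := by
  have hiL : i ≤ n := by omega
  have hjL : i + L ≤ n := hin
  -- the pure running (max, argmax) pair
  have kfold : ∀ c, c ≤ L - 1 →
      (List.range' (i + 1) c).foldl
          (fun (st : List (List Int) × List (List Int)) k =>
            let q := pvGet2 st.1 i k * pvGet2 st.1 k (i + L)
            if q > pvGet2 st.1 i (i + L)
            then (pvSet2 st.1 i (i + L) q, pvSet2 st.2 i (i + L) (k : Int)) else st)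
          (pvMk n (fun a b => if a = i ∧ b = i + L then 0 else f a b), pvMk n g)
        = (pvMk n (fun a b => if a = i ∧ b = i + L
              then ((List.range' (i + 1) c).foldl
                (fun (st : Int × Int) k =>
                  let p := pvP entry database i k * pvP entry database k (i + L)
                  if p > st.1 then (p, (k : Int)) else st) ((0 : Int), (0 : Int))).1
              else f a b),
           pvMk n (fun a b => if a = i ∧ b = i + L
              then ((List.range' (i + 1) c).foldl
                (fun (st : Int × Int) k =>
                  let p := pvP entry database i k * pvP entry database k (i + L)
                  if p > st.1 then (p, (k : Int)) else st) ((0 : Int), (0 : Int))).2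
              else g a b)) := by
    intro c
    induction c with
    | zero =>
      intro _
      simp only [List.range'_zero, List.foldl_nil]
      rw [Prod.mk.injEq]
      refine ⟨rfl, pvMk_congr ?_⟩
      intro a b _ _
      by_cases hab : a = i ∧ b = i + L
      · obtain ⟨rfl, rfl⟩ := hab
        rw [if_pos ⟨rfl, rfl⟩, Hg0]
      · rw [if_neg hab]
    | succ c ih =>
      intro hc
      rw [List.range'_concat, List.foldl_append, List.foldl_append,
          List.foldl_cons, List.foldl_nil, List.foldl_cons, List.foldl_nil,
          ih (by omega)]
      have hone : 1 * c = c := by omega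
      rw [hone] at *
      set k := i + 1 + c with hk
      set ms := (List.range' (i + 1) c).foldl
          (fun (st : Int × Int) k =>
            let p := pvP entry database i k * pvP entry database k (i + L)
            if p > st.1 then (p, (k : Int)) else st) ((0 : Int), (0 : Int)) with hms
      have hkn : k ≤ n := by omega
      have hread1 : pvGet2 (pvMk n (fun a b => if a = i ∧ b = i + L then ms.1 else f a b)) i k
          = pvP entry database i k := by
        rw [pvGet2_mk _ hiL hkn, if_neg (by omega), Hf i k (by omega) (by omega) (by omega)]
      have hread2 : pvGet2 (pvMk n (fun a b => if a = i ∧ b = i + L then ms.1 else f a b)) k (i + L)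
          = pvP entry database k (i + L) := by
        rw [pvGet2_mk _ hkn hjL, if_neg (by omega), Hf k (i + L) (by omega) (by omega) (by omega)]
      have hread3 : pvGet2 (pvMk n (fun a b => if a = i ∧ b = i + L then ms.1 else f a b)) i (i + L)
          = ms.1 := by
        rw [pvGet2_mk _ hiL hjL, if_pos ⟨rfl, rfl⟩]
      simp only [hread1, hread2, hread3]
      by_cases hgt : pvP entry database i k * pvP entry database k (i + L) > ms.1
      · rw [if_pos hgt, if_pos hgt]
        rw [pvSet2_mk _ _ hiL hjL, pvSet2_mk _ _ hiL hjL]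
        rw [Prod.mk.injEq]
        refine ⟨?_, ?_⟩
        · apply pvMk_congr
          intro a b _ _
          by_cases hab : a = i ∧ b = i + L <;> simp only [if_pos, if_neg, hab] <;> simp [hab]
        · apply pvMk_congr
          intro a b _ _
          by_cases hab : a = i ∧ b = i + L <;> simp [hab]
      · rw [if_neg hgt, if_neg hgt]
  -- now the whole cell body
  show pvCellA entry database L (pvMk n f, pvMk n g) i = _
  unfold pvCellA
  simp only []
  rw [pvSet2_mk _ _ hiL hjL]
  rw [kfold (L - 1) (le_refl _)]
  have hlen : (i + L) - i - 1 = L - 1 := by omega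
  have hmsfull : (List.range' (i + 1) (L - 1)).foldl
      (fun (st : Int × Int) k =>
        let p := pvP entry database i k * pvP entry database k (i + L)
        if p > st.1 then (p, (k : Int)) else st) ((0 : Int), (0 : Int))
      = pvFoldMS entry database i (i + L) := by
    unfold pvFoldMS
    rw [hlen]
  rw [hmsfull]
  set ms := pvFoldMS entry database i (i + L) with hms
  have hrd : pvGet2 (pvMk n (fun a b => if a = i ∧ b = i + L then ms.1 else f a b)) i (i + L)
      = ms.1 := by rw [pvGet2_mk _ hiL hjL, if_pos ⟨rfl, rfl⟩]
  simp only [hrd]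
  have hPij := pvP_two entry database (i := i) (j := i + L) (by omega)
  have hSij : pvS entry database i (i + L)
      = if pvDb entry database i (i + L) * pvDb entry database i (i + L) * 100 > ms.1
        then 0 else ms.2 := by
    unfold pvS
    rw [← hms]
  by_cases hq : pvDb entry database i (i + L) * pvDb entry database i (i + L) * 100 > ms.1
  · rw [if_pos hq]
    rw [pvSet2_mk _ _ hiL hjL, pvSet2_mk _ _ hiL hjL]
    rw [Prod.mk.injEq]
    refine ⟨?_, ?_⟩
    · apply pvMk_congr
      intro a b _ _
      by_cases hab : a = i ∧ b = i + L
      · obtain ⟨rfl, rfl⟩ := hab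
        rw [if_pos ⟨rfl, rfl⟩, if_pos ⟨rfl, rfl⟩, hPij, ← hms, if_pos hq]
      · simp [hab]
    · apply pvMk_congr
      intro a b _ _
      by_cases hab : a = i ∧ b = i + L
      · obtain ⟨rfl, rfl⟩ := hab
        rw [if_pos ⟨rfl, rfl⟩, if_pos ⟨rfl, rfl⟩, hSij, if_pos hq]
      · simp [hab]
  · rw [if_neg hq]
    rw [Prod.mk.injEq]
    refine ⟨?_, ?_⟩
    · apply pvMk_congr
      intro a b _ _
      by_cases hab : a = i ∧ b = i + L
      · obtain ⟨rfl, rfl⟩ := hab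
        rw [if_pos ⟨rfl, rfl⟩, if_pos ⟨rfl, rfl⟩, hPij, ← hms, if_neg hq]
      · simp [hab]
    · apply pvMk_congr
      intro a b _ _
      by_cases hab : a = i ∧ b = i + L
      · obtain ⟨rfl, rfl⟩ := hab
        rw [if_pos ⟨rfl, rfl⟩, if_pos ⟨rfl, rfl⟩, hSij, if_neg hq]
      · simp [hab]

theorem pvRoundA (entry : String) (database : List (String × Int)) {n L : Nat}
    (hL : 2 ≤ L) (hLn : L ≤ n) :
    (List.range (n - L + 1)).foldl (pvCellA entry database L)
        (pvMk n (pvPtF entry database n (L - 1)), pvMk n (pvSepF entry database n (L - 1)))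
      = (pvMk n (pvPtF entry database n L), pvMk n (pvSepF entry database n L)) := by
  have aux : ∀ m, m ≤ n - L + 1 →
      (List.range m).foldl (pvCellA entry database L)
          (pvMk n (pvPtF entry database n (L - 1)), pvMk n (pvSepF entry database n (L - 1)))
        = (pvMk n (fun a b => if b = a + L ∧ a < m then pvP entry database a b
              else pvPtF entry database n (L - 1) a b),
           pvMk n (fun a b => if b = a + L ∧ a < m then pvS entry database a b
              else pvSepF entry database n (L - 1) a b)) := by
    intro m
    induction m with
    | zero =>
      intro _
      simp only [List.range_zero, List.foldl_nil, Prod.mk.injEq]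
      refine ⟨pvMk_congr ?_, pvMk_congr ?_⟩ <;>
        · intro a b _ _
          rw [if_neg (by omega)]
    | succ m ih =>
      intro hm
      rw [List.range_succ, List.foldl_append, ih (by omega), List.foldl_cons, List.foldl_nil]
      rw [pvCellA_eq entry database hL (by omega)
            (fun a b => if b = a + L ∧ a < m then pvP entry database a b
              else pvPtF entry database n (L - 1) a b)
            (fun a b => if b = a + L ∧ a < m then pvS entry database a b
              else pvSepF entry database n (L - 1) a b)
            (by
              intro a b h1 h2 h3
              show (if b = a + L ∧ a < m then _ else _) = _
              rw [if_neg (by omega)]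
              unfold pvPtF
              rw [if_pos ⟨h1, by omega, h3⟩])
            (by
              show (if m + L = m + L ∧ m < m then _ else _) = _
              rw [if_neg (by omega)]
              unfold pvSepF
              rw [if_neg (by omega)])]
      simp only [Prod.mk.injEq]
      refine ⟨pvMk_congr ?_, pvMk_congr ?_⟩ <;>
        · intro a b _ _
          by_cases hab : a = m ∧ b = m + L
          · obtain ⟨rfl, rfl⟩ := hab
            rw [if_pos ⟨rfl, rfl⟩, if_pos (by omega)]
          · rw [if_neg hab]
            by_cases hold : b = a + L ∧ a < m
            · rw [if_pos hold, if_pos (by omega)]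
            · rw [if_neg hold, if_neg (by omega)]
  rw [aux (n - L + 1) (le_refl _)]
  simp only [Prod.mk.injEq]
  refine ⟨pvMk_congr ?_, pvMk_congr ?_⟩
  · intro a b ha hb
    unfold pvPtF
    by_cases hab : b = a + L ∧ a < n - L + 1
    · rw [if_pos hab, if_pos (by omega)]
    · rw [if_neg hab]
      by_cases hc : 1 ≤ b - a ∧ b - a ≤ L - 1 ∧ b ≤ n
      · rw [if_pos hc, if_pos (by omega)]
      · rw [if_neg hc, if_neg (by omega)]
  · intro a b ha hb
    unfold pvSepF
    by_cases hab : b = a + L ∧ a < n - L + 1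
    · rw [if_pos hab, if_pos (by omega)]
    · rw [if_neg hab]
      by_cases hc : 2 ≤ b - a ∧ b - a ≤ L - 1 ∧ b ≤ n
      · rw [if_pos hc, if_pos (by omega)]
      · rw [if_neg hc, if_neg (by omega)]

theorem pvOuterA (entry : String) (database : List (String × Int)) {n : Nat} :
    ∀ c, c ≤ n - 1 →
      (List.range' 2 c).foldl
          (fun (st : List (List Int) × List (List Int)) L =>
            (List.range (n - L + 1)).foldl (pvCellA entry database L) st)
          (pvMk n (pvPtF entry database n 1), pvMk n (pvSepF entry database n 1))
        = (pvMk n (pvPtF entry database n (1 + c)), pvMk n (pvSepF entry database n (1 + c))) := by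
  intro c
  induction c with
  | zero => intro _; simp
  | succ c ih =>
    intro hc
    rw [List.range'_concat, List.foldl_append, ih (by omega), List.foldl_cons, List.foldl_nil]
    have h1c : 2 + 1 * c = 2 + c := by omega
    rw [h1c]
    have e1 : 1 + c = (2 + c) - 1 := by omega
    rw [e1]
    rw [pvRoundA entry database (by omega) (by omega)]
    have e2 : 2 + c = 1 + (c + 1) := by omega
    rw [e2]

theorem pvA_eq (entry : String) (database : List (String × Int)) :
    bottomUpTable entry database
      = pvMk entry.toList.length
          (pvSepF entry database entry.toList.length (1 + (entry.toList.length - 1))) := by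
  unfold bottomUpTable
  set n := entry.toList.length with hn
  simp only [pvMk_replicate]
  rw [pvInitA entry database n n (le_refl _)]
  have e1 : pvMk n (fun i j => if j - i = 1 ∧ j ≤ n then pvP entry database i j else 0)
      = pvMk n (pvPtF entry database n 1) := by
    apply pvMk_congr
    intro i j _ _
    unfold pvPtF
    by_cases h : j - i = 1 ∧ j ≤ n
    · rw [if_pos h, if_pos (by omega)]
    · rw [if_neg h, if_neg (by omega)]
  have e2 : pvMk n (fun _ _ => (0 : Int)) = pvMk n (pvSepF entry database n 1) := by
    apply pvMk_congr
    intro i j _ _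
    unfold pvSepF
    rw [if_neg (by omega)]
  rw [e1, e2, pvOuterA entry database (n - 1) (le_refl _)]

def pvMemoOK (entry : String) (database : List (String × Int))
    (memo : PySem.Dict (Nat × Nat) Int) : Prop :=
  ∀ p v, memo.get? p = some v → v = pvP entry database p.1 p.2

theorem pvSolve_ok (entry : String) (database : List (String × Int)) :
    ∀ (f i j : Nat) (memo : PySem.Dict (Nat × Nat) Int), 0 < j - i → j - i ≤ f →
      pvMemoOK entry database memo →
      pvMemoOK entry database (pvSolve entry database f i j memo).2
      ∧ (∀ p, (memo.get? p).isSome → (((pvSolve entry database f i j memo).2).get? p).isSome)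
      ∧ (((pvSolve entry database f i j memo).2).get? (i, j)).isSome
      ∧ (pvSolve entry database f i j memo).1 = pvP entry database i j := by
  intro f
  induction f with
  | zero => intro i j memo h1 h2; omega
  | succ f IH =>
    intro i j memo h1 h2 hOK
    cases hget : memo.get? (i, j) with
    | some v =>
      simp only [pvSolve, hget]
      exact ⟨hOK, fun p hp => hp, by simp [hget], by simpa using hOK (i, j) v hget⟩
    | none =>
      by_cases hj1 : j = i + 1
      · subst hj1
        simp only [pvSolve, hget, if_pos rfl]
        refine ⟨?_, ?_, ?_, (pvP_base entry database i).symm⟩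
        · intro p v hp
          rw [PySem.Dict.get?_insert] at hp
          by_cases hpij : p = (i, i + 1)
          · rw [if_pos hpij] at hp
            cases hp
            subst hpij
            exact (pvP_base entry database i).symm
          · rw [if_neg hpij] at hp
            exact hOK p v hp
        · intro p hp
          rw [PySem.Dict.get?_insert]
          by_cases hpij : p = (i, i + 1) <;> simp [hpij, hp]
        · rw [PySem.Dict.get?_insert, if_pos rfl]
          rfl
      · have hji2 : 2 ≤ j - i := by omega
        have fold_ok : ∀ (ks : List Nat), (∀ k ∈ ks, i + 1 ≤ k ∧ k < j) →
            ∀ (m0 : Int) (memo0 : PySem.Dict (Nat × Nat) Int),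
              pvMemoOK entry database memo0 →
              pvMemoOK entry database
                ((ks.foldl (fun (st : Int × PySem.Dict (Nat × Nat) Int) k =>
                  let amo := pvSolve entry database f i k st.2
                  let bmo := pvSolve entry database f k j amo.2
                  let p := amo.1 * bmo.1
                  (if p > st.1 then p else st.1, bmo.2)) (m0, memo0)).2)
              ∧ (∀ p, (memo0.get? p).isSome →
                  (((ks.foldl (fun (st : Int × PySem.Dict (Nat × Nat) Int) k =>
                    let amo := pvSolve entry database f i k st.2
                    let bmo := pvSolve entry database f k j amo.2
                    let p := amo.1 * bmo.1
                    (if p > st.1 then p else st.1, bmo.2)) (m0, memo0)).2).get? p).isSome)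
              ∧ ((ks.foldl (fun (st : Int × PySem.Dict (Nat × Nat) Int) k =>
                    let amo := pvSolve entry database f i k st.2
                    let bmo := pvSolve entry database f k j amo.2
                    let p := amo.1 * bmo.1
                    (if p > st.1 then p else st.1, bmo.2)) (m0, memo0)).1
                  = ks.foldl (fun m k =>
                      let p := pvP entry database i k * pvP entry database k j
                      if p > m then p else m) m0) := by
          intro ks
          induction ks with
          | nil => intro _ m0 memo0 h0; exact ⟨h0, fun p hp => hp, rfl⟩
          | cons k t iht =>
            intro hmem m0 memo0 h0
            obtain ⟨hk1, hk2⟩ := hmem k (by simp)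
            have ha := IH i k memo0 (by omega) (by omega) h0
            have hb := IH k j (pvSolve entry database f i k memo0).2 (by omega) (by omega) ha.1
            simp only [List.foldl_cons]
            have hrec := iht (fun k' hk' => hmem k' (List.mem_cons_of_mem _ hk'))
              (if (pvSolve entry database f i k memo0).1 *
                  (pvSolve entry database f k j (pvSolve entry database f i k memo0).2).1 > m0
               then (pvSolve entry database f i k memo0).1 *
                  (pvSolve entry database f k j (pvSolve entry database f i k memo0).2).1
               else m0)
              (pvSolve entry database f k j (pvSolve entry database f i k memo0).2).2
              hb.1
            refine ⟨hrec.1, ?_, ?_⟩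
            · intro p hp
              exact hrec.2.1 p (hb.2.1 p (ha.2.1 p hp))
            · rw [hrec.2.2, ha.2.2.2, hb.2.2.2]
        have hmem : ∀ k ∈ List.range' (i + 1) (j - i - 1), i + 1 ≤ k ∧ k < j := by
          intro k hk
          rw [List.mem_range'_1] at hk
          omega
        have hfold := fold_ok (List.range' (i + 1) (j - i - 1)) hmem 0 memo hOK
        simp only [pvSolve, hget, if_neg hj1]
        have hval : (if pvDb entry database i j * pvDb entry database i j * 100 >
              ((List.range' (i + 1) (j - i - 1)).foldl (fun (st : Int × PySem.Dict (Nat × Nat) Int) k =>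
                  let amo := pvSolve entry database f i k st.2
                  let bmo := pvSolve entry database f k j amo.2
                  let p := amo.1 * bmo.1
                  (if p > st.1 then p else st.1, bmo.2)) ((0 : Int), memo)).1
            then pvDb entry database i j
            else ((List.range' (i + 1) (j - i - 1)).foldl (fun (st : Int × PySem.Dict (Nat × Nat) Int) k =>
                  let amo := pvSolve entry database f i k st.2
                  let bmo := pvSolve entry database f k j amo.2
                  let p := amo.1 * bmo.1
                  (if p > st.1 then p else st.1, bmo.2)) ((0 : Int), memo)).1)
            = pvP entry database i j := by
          rw [hfold.2.2]
          rw [pvP_two entry database hji2]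
          have : (pvFoldMS entry database i j).1
              = (List.range' (i + 1) (j - i - 1)).foldl (fun m k =>
                  let p := pvP entry database i k * pvP entry database k j
                  if p > m then p else m) 0 := by
            unfold pvFoldMS
            exact pvFold_fst _ _ _ _ _
          rw [this]
        refine ⟨?_, ?_, ?_, hval⟩
        · intro p v hp
          rw [PySem.Dict.get?_insert] at hp
          by_cases hpij : p = (i, j)
          · rw [if_pos hpij] at hp
            cases hp
            subst hpij
            simpa using hval
          · rw [if_neg hpij] at hp
            exact hfold.1 p v hp
        · intro p hp
          rw [PySem.Dict.get?_insert]
          by_cases hpij : p = (i, j) <;> simp [hpij]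
          exact hfold.2.1 p hp
        · rw [PySem.Dict.get?_insert, if_pos rfl]
          rfl

theorem pvPhase1 (entry : String) (database : List (String × Int)) (n : Nat) :
    pvMemoOK entry database
      ((List.range n).foldl (fun memo i =>
          (List.range' (i + 1) (n - i)).foldl
            (fun memo j => (pvSolve entry database (j - i) i j memo).2) memo)
        PySem.Dict.empty)
    ∧ ∀ a b, a < b → b ≤ n →
        ((((List.range n).foldl (fun memo i =>
            (List.range' (i + 1) (n - i)).foldl
              (fun memo j => (pvSolve entry database (j - i) i j memo).2) memo)
          PySem.Dict.empty)).get? (a, b)).isSome := by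
  have inner : ∀ (i : Nat), i < n → ∀ (c : Nat), c ≤ n - i →
      ∀ (memo0 : PySem.Dict (Nat × Nat) Int), pvMemoOK entry database memo0 →
        pvMemoOK entry database
          ((List.range' (i + 1) c).foldl
            (fun memo j => (pvSolve entry database (j - i) i j memo).2) memo0)
        ∧ (∀ p, (memo0.get? p).isSome →
            (((List.range' (i + 1) c).foldl
              (fun memo j => (pvSolve entry database (j - i) i j memo).2) memo0).get? p).isSome)
        ∧ (∀ b, i + 1 ≤ b → b < i + 1 + c →
            (((List.range' (i + 1) c).foldl
              (fun memo j => (pvSolve entry database (j - i) i j memo).2) memo0).get? (i, b)).isSome) := by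
    intro i hi c
    induction c with
    | zero =>
      intro _ memo0 h0
      exact ⟨h0, fun p hp => hp, fun b hb1 hb2 => by omega⟩
    | succ c ihc =>
      intro hc memo0 h0
      rw [List.range'_concat]
      rw [List.foldl_append, List.foldl_cons, List.foldl_nil]
      have h1c : i + 1 + 1 * c = i + 1 + c := by omega
      rw [h1c]
      have hprev := ihc (by omega) memo0 h0
      have hstep := pvSolve_ok entry database ((i + 1 + c) - i) i (i + 1 + c) _
        (by omega) (by omega) hprev.1
      refine ⟨hstep.1, ?_, ?_⟩
      · intro p hp
        exact hstep.2.1 p (hprev.2.1 p hp)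
      · intro b hb1 hb2
        by_cases hb : b = i + 1 + c
        · subst hb
          exact hstep.2.2.1
        · exact hstep.2.1 (i, b) (hprev.2.2 b hb1 (by omega))
  have outer : ∀ m, m ≤ n →
      pvMemoOK entry database
        ((List.range m).foldl (fun memo i =>
            (List.range' (i + 1) (n - i)).foldl
              (fun memo j => (pvSolve entry database (j - i) i j memo).2) memo)
          PySem.Dict.empty)
      ∧ ∀ a b, a < m → a < b → b ≤ n →
          ((((List.range m).foldl (fun memo i =>
              (List.range' (i + 1) (n - i)).foldl
                (fun memo j => (pvSolve entry database (j - i) i j memo).2) memo)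
            PySem.Dict.empty)).get? (a, b)).isSome := by
    intro m
    induction m with
    | zero =>
      intro _
      exact ⟨fun p v hp => by simp [PySem.Dict.get?_empty] at hp,
             fun a b ha _ _ => by omega⟩
    | succ m ihm =>
      intro hm
      rw [List.range_succ, List.foldl_append, List.foldl_cons, List.foldl_nil]
      have hprev := ihm (by omega)
      have hin := inner m (by omega) (n - m) (le_refl _) _ hprev.1
      refine ⟨hin.1, ?_⟩
      intro a b ha hab hb
      by_cases ham : a = m
      · subst ham
        exact hin.2.2 b (by omega) (by omega)
      · exact hin.2.1 (a, b) (hprev.2 a b (by omega) hab hb)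
  exact ⟨(outer n (le_refl _)).1, fun a b hab hb => (outer n (le_refl _)).2 a b (by omega) hab hb⟩

theorem pvFold2_char (g : Nat → Int) (s : Nat) :
    ∀ c, 0 < c →
      ((List.range' s c).foldl
          (fun (st : Int × Int) k =>
            let p := g k
            if p > st.1 then (p, (k : Int)) else st) ((0 : Int), (0 : Int)))
        = (max ((PySem.List.max? ((List.range' s c).map g) (fun y => y)).getD 0) 0,
           if ((PySem.List.max? ((List.range' s c).map g) (fun y => y)).getD 0) > 0
           then ((s : Int) +
             ((PySem.List.index? ((List.range' s c).map g)
                ((PySem.List.max? ((List.range' s c).map g) (fun y => y)).getD 0)).getD 0 : Nat))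
           else 0) := by
  intro c
  induction c with
  | zero => intro h; omega
  | succ c ih =>
    intro _
    by_cases hc : c = 0
    · subst hc
      rw [show (0 : Nat) + 1 = 1 from rfl]
      simp only [List.range'_one, List.foldl_cons, List.foldl_nil, List.map_cons, List.map_nil,
        PySem.List.max?_id_cons, Option.getD_some]
      rw [PySem.List.index?_cons_self]
      simp only [List.foldl_nil, Option.getD_some]
      by_cases hgs : g s > 0
      · rw [if_pos hgs, if_pos hgs]
        have : max (g s) 0 = g s := by omega
        rw [this]
        simp
      · rw [if_neg hgs, if_neg hgs]
        have : max (g s) 0 = 0 := by omega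
        rw [this]
    · have hc0 : 0 < c := by omega
      rw [List.range'_concat, List.foldl_append, List.foldl_cons, List.foldl_nil, ih hc0]
      have h1c : s + 1 * c = s + c := by omega
      rw [h1c]
      set ps := (List.range' s c).map g with hps
      have hlen : ps.length = c := by rw [hps]; simp
      have hne : ps ≠ [] := by
        intro h
        rw [h] at hlen
        simp at hlen
        omega
      cases hmx : PySem.List.max? ps (fun y => y) with
      | none =>
        rw [PySem.List.max?_eq_none_iff] at hmx
        exact absurd hmx hne
      | some M =>
        have hub : ∀ y ∈ ps, y ≤ M := by
          intro y hy
          exact PySem.List.max?_isMax hmx y hy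
        have hmem : M ∈ ps := PySem.List.max?_mem hmx
        set p := g (s + c) with hp
        have hmap : (List.range' s c ++ [s + c]).map g = ps ++ [p] := by
          rw [List.map_append]
          rfl
        have hM' : PySem.List.max? (ps ++ [p]) (fun y => y) = some (max M p) := by
          obtain ⟨x, t, hxt⟩ := List.exists_cons_of_ne_nil hne
          rw [hxt] at hmx ⊢
          rw [PySem.List.max?_id_cons] at hmx
          have hMfold : t.foldl max x = M := by
            injection hmx
          show PySem.List.max? (x :: (t ++ [p])) (fun y => y) = _
          rw [PySem.List.max?_id_cons, List.foldl_append, hMfold]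
          simp
        rw [hmap, hM']
        simp only [Option.getD_some, hmx]
        by_cases h1 : p > M
        · have hnotmem : p ∉ ps := fun hmem' => absurd h1 (by have := hub p hmem'; omega)
          have hidx : PySem.List.index? (ps ++ [p]) p = some ps.length :=
            PySem.List.index?_append_singleton_self ps p hnotmem
          by_cases h2 : p > 0
          · have hcond : max M 0 < p := max_lt_iff.mpr ⟨h1, h2⟩
            rw [if_pos hcond]
            have hMp : max M p = p := max_eq_right (le_of_lt h1)
            rw [hMp, hidx, if_pos h2]
            have hmp : max p 0 = p := by omega
            rw [hmp, hlen]
            simp only [Option.getD_some]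
            constructor <;> push_cast <;> ring
          · have hcond : ¬ (max M 0 < p) := by
              have := le_max_right M (0 : Int)
              omega
            rw [if_neg hcond]
            have hMp : max M p = p := max_eq_right (le_of_lt h1)
            rw [hMp]
            have hM0 : ¬ ((M : Int) > 0) := by omega
            have hp0 : ¬ ((p : Int) > 0) := h2
            rw [if_neg hM0, if_neg hp0]
            have e1 : max M (0 : Int) = 0 := by omega
            have e2 : max p (0 : Int) = 0 := by omega
            rw [e1, e2]
        · have hMp : max M p = M := max_eq_left (by omega)
          have hidx : PySem.List.index? (ps ++ [p]) M = PySem.List.index? ps M :=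
            PySem.List.index?_append_of_mem [p] hmem
          rw [hMp, hidx]
          by_cases h3 : (M : Int) > 0
          · have hcond : ¬ (max M 0 < p) := by
              have : max M (0 : Int) = M := by omega
              omega
            rw [if_neg hcond]
          · have hcond : ¬ (max M 0 < p) := by
              have := le_max_right M (0 : Int)
              omega
            rw [if_neg hcond]

theorem pvSepB_eq (entry : String) (database : List (String × Int)) {n i j : Nat}
    (memo : PySem.Dict (Nat × Nat) Int)
    (hm : pvMemoOK entry database memo)
    (hsome : ∀ a b, a < b → b ≤ n → ((memo.get? (a, b)).isSome))
    (hij : i + 2 ≤ j) (hj : j ≤ n) :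
    pvSepB entry database memo i j = pvS entry database i j := by
  have hc : 0 < j - i - 1 := by omega
  have hgetP : ∀ a b, a < b → b ≤ n → memo.getD (a, b) 0 = pvP entry database a b := by
    intro a b hab hb
    obtain ⟨v, hv⟩ := Option.isSome_iff_exists.mp (hsome a b hab hb)
    have hveq := hm (a, b) v hv
    rw [PySem.Dict.getD_eq_get?_getD, hv]
    simpa using hveq
  unfold pvSepB pvS pvFoldMS
  have hmapeq : (List.range' (i + 1) (j - i - 1)).map
        (fun k => memo.getD (i, k) 0 * memo.getD (k, j) 0)
      = (List.range' (i + 1) (j - i - 1)).map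
        (fun k => pvP entry database i k * pvP entry database k j) := by
    apply List.map_congr_left
    intro k hk
    rw [List.mem_range'_1] at hk
    rw [hgetP i k (by omega) (by omega), hgetP k j (by omega) hj]
  rw [hmapeq]
  rw [pvFold2_char (fun k => pvP entry database i k * pvP entry database k j) (i + 1) (j - i - 1) hc]
  simp only []
  set M := (PySem.List.max? ((List.range' (i + 1) (j - i - 1)).map
      (fun k => pvP entry database i k * pvP entry database k j)) (fun y => y)).getD 0 with hM
  set idx := ((PySem.List.index? ((List.range' (i + 1) (j - i - 1)).map
      (fun k => pvP entry database i k * pvP entry database k j)) M).getD 0 : Nat) with hidx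
  by_cases hq : pvDb entry database i j * pvDb entry database i j * 100 > max M 0
  · rw [if_pos hq, if_pos hq]
  · rw [if_neg hq, if_neg hq]
    by_cases h3 : M > 0
    · rw [if_pos h3, if_pos h3]
      push_cast
      ring
    · rw [if_neg h3, if_neg h3]

theorem pvB_eq (entry : String) (database : List (String × Int)) :
    bottomUpTable_alt entry database
      = pvMk entry.toList.length
          (pvSepF entry database entry.toList.length (1 + (entry.toList.length - 1))) := by
  set n := entry.toList.length with hn
  obtain ⟨hOK, hsome⟩ := pvPhase1 entry database n
  rw [show bottomUpTable_alt entry database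
      = pvMk n (fun i j => if i + 2 ≤ j then
          pvSepB entry database
            ((List.range n).foldl (fun memo i =>
              (List.range' (i + 1) (n - i)).foldl
                (fun memo j => (pvSolve entry database (j - i) i j memo).2) memo)
              PySem.Dict.empty) i j
        else 0) from rfl]
  apply pvMk_congr
  intro i j hi hj
  by_cases hij : i + 2 ≤ j
  · rw [if_pos hij]
    unfold pvSepF
    rw [if_pos (by omega)]
    exact pvSepB_eq entry database _ hOK hsome hij hj
  · rw [if_neg hij]
    unfold pvSepF
    rw [if_neg (by omega)]

-- ===== VERDICT (by name: the statement is the Claim_ definition above) =====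
theorem bottomUpTable_spec : Claim_equal_bottomUpTable := by
  intro entry database _
  unfold Spec_bottomUpTable
  rw [pvA_eq, pvB_eq]
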